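-- pv_equiv track=rewrite | github.com/mrmurphy/Simple-Python-Exercises | minesweeper/minesweeper.py | find_state_2_cells
-- ===== SOURCE A (Python) =====
-- import operator
--
-- def is_bomb(cell, row, bombs):
--     for bomb in bombs:
--         if bomb[0] == cell and bomb[1] == row:
--             return True
--     return False
--
-- def near_bombs(cell, row, bombs):
--     near_count = 0
--     for bomb in bombs:
--         if cell - 1 <= bomb[0] <= cell + 1 and \
--                 row - 1 <= bomb[1] <= row + 1:
--             near_count += 1
--     return near_count
--
-- def find_state_2_cells(givenlines):
--     width = int(givenlines[0][0])
--     height = int(givenlines[0][1])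
--     bombs = givenlines[1:]
--     state_2_cells = []
--
--     for row in range(height):
--         for cell in range(width):
--             if not is_bomb(cell, row, bombs):
--                 b = near_bombs(cell, row, bombs)
--                 if b:
--                     state_2_cells.append((cell, row, b))
--
--     return sorted(state_2_cells, key=operator.itemgetter(0, 1))
-- ===== SOURCE B (Python) =====
-- def find_state_2_cells(givenlines):
--     width = int(givenlines[0][0])
--     height = int(givenlines[0][1])
--     counts = {}
--     bomb_cells = set()
--     for bomb in givenlines[1:]:
--         x, y = bomb[0], bomb[1]
--         bomb_cells.add((x, y))
--         for dx in (-1, 0, 1):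
--             for dy in (-1, 0, 1):
--                 key = (x + dx, y + dy)
--                 counts[key] = counts.get(key, 0) + 1
--     out = []
--     for cell in range(width):
--         for row in range(height):
--             if (cell, row) not in bomb_cells:
--                 b = counts.get((cell, row), 0)
--                 if b:
--                     out.append((cell, row, b))
--     return out
-- ===== Notes on version B (the rewrite author's own statement) =====
-- stated objective: faster
-- what changed: Instead of scanning the whole bomb list for every grid cell (is_bomb + near_bombs per cell) and then sorting, B makes one pass over the bombs scattering +1 into a dict for each bomb's 9 neighbour cells and recording bomb cells in a set, then emits the grid in column-major (cell,row) order, which is already the sorted order, so no sort is needed.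
-- outside the precondition, e.g. on find_state_2_cells([[1, 1], [5]]): A returns [], B raises IndexError
import Mathlib
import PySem

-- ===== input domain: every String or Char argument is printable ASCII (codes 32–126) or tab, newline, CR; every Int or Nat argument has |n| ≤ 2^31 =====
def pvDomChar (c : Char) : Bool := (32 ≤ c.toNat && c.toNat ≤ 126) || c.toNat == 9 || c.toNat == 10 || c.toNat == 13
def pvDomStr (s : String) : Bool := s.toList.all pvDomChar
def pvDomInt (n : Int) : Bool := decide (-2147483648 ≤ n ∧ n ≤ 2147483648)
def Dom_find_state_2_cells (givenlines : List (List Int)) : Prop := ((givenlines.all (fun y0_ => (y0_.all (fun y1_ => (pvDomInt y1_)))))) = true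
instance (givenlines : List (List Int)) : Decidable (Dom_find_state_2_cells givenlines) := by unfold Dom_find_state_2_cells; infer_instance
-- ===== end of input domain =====

-- B scatters each bomb's +1 onto its 9 neighbour cells via a dict and a bomb set in one pass over the
-- bombs, then emits the grid column-major (already the sorted (cell,row) order), instead of scanning
-- the whole bomb list per grid cell and sorting afterwards (objective: faster).


-- ===== PORT A =====
-- bomb[0] / bomb[1] ported as total pyGetD; Pre_ keeps every bomb row at length ≥ 2, where this is exact
def is_bomb (cell row : Int) : List (List Int) → Bool
  | [] => false
  | bomb :: rest =>
      if PySem.List.pyGetD bomb 0 0 = cell ∧ PySem.List.pyGetD bomb 1 0 = row then true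
      else is_bomb cell row rest

def near_bombs (cell row : Int) (bombs : List (List Int)) : Int :=
  bombs.foldl (fun near_count bomb =>
    if cell - 1 ≤ PySem.List.pyGetD bomb 0 0 ∧ PySem.List.pyGetD bomb 0 0 ≤ cell + 1 ∧
       row - 1 ≤ PySem.List.pyGetD bomb 1 0 ∧ PySem.List.pyGetD bomb 1 0 ≤ row + 1
    then near_count + 1 else near_count) 0

def find_state_2_cells (givenlines : List (List Int)) : List (Int × Int × Int) :=
  let g0 := PySem.List.pyGetD givenlines 0 []
  let width := PySem.List.pyGetD g0 0 0
  let height := PySem.List.pyGetD g0 1 0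
  let bombs := PySem.List.slice givenlines (some 1) none
  let state_2_cells :=
    (PySem.List.pyRange 0 height 1).foldl (fun acc row =>
      (PySem.List.pyRange 0 width 1).foldl (fun acc cell =>
        if is_bomb cell row bombs = false then
          let b := near_bombs cell row bombs
          if b ≠ 0 then acc ++ [(cell, row, b)] else acc
        else acc) acc) []
  PySem.List.sorted2 state_2_cells (fun t => t.1) (fun t => t.2.1)

-- ===== PORT B =====
def pvOffsets : List Int := [-1, 0, 1]

def find_state_2_cells_alt (givenlines : List (List Int)) : List (Int × Int × Int) :=
  let g0 := PySem.List.pyGetD givenlines 0 []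
  let width := PySem.List.pyGetD g0 0 0
  let height := PySem.List.pyGetD g0 1 0
  let st :=
    (PySem.List.slice givenlines (some 1) none).foldl
      (fun (st : PySem.Dict (Int × Int) Int × PySem.Set (Int × Int)) bomb =>
        (pvOffsets.foldl (fun c dx =>
            pvOffsets.foldl (fun c dy =>
              c.insert (PySem.List.pyGetD bomb 0 0 + dx, PySem.List.pyGetD bomb 1 0 + dy)
                (c.getD (PySem.List.pyGetD bomb 0 0 + dx, PySem.List.pyGetD bomb 1 0 + dy) 0 + 1)) c) st.1,
         st.2.add (PySem.List.pyGetD bomb 0 0, PySem.List.pyGetD bomb 1 0)))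
      (PySem.Dict.empty, PySem.Set.empty)
  (PySem.List.pyRange 0 width 1).foldl (fun out cell =>
    (PySem.List.pyRange 0 height 1).foldl (fun out row =>
      if st.2.contains (cell, row) = false then
        let b := st.1.getD (cell, row) 0
        if b ≠ 0 then out ++ [(cell, row, b)] else out
      else out) out) []

-- ===== PRECONDITION & SPEC =====
-- Pre_ excludes inputs on which the Python A raises IndexError (no usable two-element header row)
-- and, slightly narrower, requires every bomb row to have length ≥ 2: on inputs with a shorter bomb
-- row that A's short-circuit evaluation happens to skip, A returns normally but B itself raises
-- IndexError (see cites).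
def Pre_find_state_2_cells (givenlines : List (List Int)) : Prop :=
  givenlines ≠ [] ∧ 2 ≤ (givenlines.headD []).length ∧ ∀ b ∈ givenlines.tail, 2 ≤ b.length
instance (givenlines : List (List Int)) : Decidable (Pre_find_state_2_cells givenlines) := by
  unfold Pre_find_state_2_cells; infer_instance

def pvWitness_find_state_2_cells : List (List Int) := [[3, 3], [1, 1]]

def Spec_find_state_2_cells (givenlines : List (List Int)) (out : List (Int × Int × Int)) : Prop := out = find_state_2_cells_alt givenlines
instance (givenlines : List (List Int)) (out : List (Int × Int × Int)) : Decidable (Spec_find_state_2_cells givenlines out) := by unfold Spec_find_state_2_cells; infer_instance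

-- ===== CLAIM (what is proved, stated in full; the proofs are below) =====
def Claim_equal_find_state_2_cells : Prop := ∀ (givenlines : List (List Int)), Dom_find_state_2_cells givenlines → Pre_find_state_2_cells givenlines → Spec_find_state_2_cells givenlines (find_state_2_cells givenlines)

-- ===== LEMMAS AND PROOFS =====

-- the per-cell emitted entry; both loops reduce to flatMaps of this
def pvEntry (bombs : List (List Int)) (cell row : Int) : List (Int × Int × Int) :=
  if is_bomb cell row bombs = false ∧ near_bombs cell row bombs ≠ 0
  then [(cell, row, near_bombs cell row bombs)] else []

-- the Python sort key (cell, row): tuples compare lexicographically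
def pvKey (t : Int × Int × Int) : Lex (Int × Int) := toLex (t.1, t.2.1)

theorem pv_near_eq_sum (c r : Int) (bs : List (List Int)) :
    near_bombs c r bs =
      (bs.map (fun bomb =>
        if c - 1 ≤ PySem.List.pyGetD bomb 0 0 ∧ PySem.List.pyGetD bomb 0 0 ≤ c + 1 ∧
           r - 1 ≤ PySem.List.pyGetD bomb 1 0 ∧ PySem.List.pyGetD bomb 1 0 ≤ r + 1
        then (1 : Int) else 0)).sum := by
  unfold near_bombs
  rw [show (fun (near_count : Int) bomb =>
        if c - 1 ≤ PySem.List.pyGetD bomb 0 0 ∧ PySem.List.pyGetD bomb 0 0 ≤ c + 1 ∧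
           r - 1 ≤ PySem.List.pyGetD bomb 1 0 ∧ PySem.List.pyGetD bomb 1 0 ≤ r + 1
        then near_count + 1 else near_count)
      = (fun (near_count : Int) bomb => near_count +
          if c - 1 ≤ PySem.List.pyGetD bomb 0 0 ∧ PySem.List.pyGetD bomb 0 0 ≤ c + 1 ∧
             r - 1 ≤ PySem.List.pyGetD bomb 1 0 ∧ PySem.List.pyGetD bomb 1 0 ≤ r + 1
          then (1 : Int) else 0) from funext fun nc => funext fun bomb => by split_ifs <;> omega]
  rw [PySem.List.foldl_add]
  omega

set_option maxHeartbeats 2000000 in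
-- B's one-bomb scatter adds 1 exactly at the cells whose neighbourhood holds the bomb
theorem pv_scatter_one (d : PySem.Dict (Int × Int) Int) (x y c r : Int) :
    (pvOffsets.foldl (fun cd dx =>
        pvOffsets.foldl (fun cd dy =>
          cd.insert (x + dx, y + dy) (cd.getD (x + dx, y + dy) 0 + 1)) cd) d).getD (c, r) 0
    = d.getD (c, r) 0 +
      (if c - 1 ≤ x ∧ x ≤ c + 1 ∧ r - 1 ≤ y ∧ y ≤ r + 1 then 1 else 0) := by
  have h : (pvOffsets.foldl (fun cd dx =>
        pvOffsets.foldl (fun cd dy =>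
          cd.insert (x + dx, y + dy) (cd.getD (x + dx, y + dy) 0 + 1)) cd) d)
      = ((pvOffsets.flatMap (fun dx => pvOffsets.map (fun dy => (x + dx, y + dy)))).foldl
          (fun cd k => cd.insert k (cd.getD k 0 + 1)) d) := by
    rw [List.foldl_flatMap]
    simp only [List.foldl_map]
  rw [h, PySem.Dict.getD_foldl_insert_add_one]
  simp only [pvOffsets, List.flatMap_cons, List.flatMap_nil, List.map_cons, List.map_nil,
    List.append_nil, List.cons_append, List.nil_append, List.count_cons, List.count_nil,
    Prod.mk.injEq, beq_iff_eq]
  split_ifs <;> omega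

-- B's dict over the whole bomb list computes near_bombs
theorem pv_scatter_all (bombs : List (List Int)) (d : PySem.Dict (Int × Int) Int) (c r : Int) :
    (bombs.foldl (fun cd bomb =>
        pvOffsets.foldl (fun cd dx =>
          pvOffsets.foldl (fun cd dy =>
            cd.insert (PySem.List.pyGetD bomb 0 0 + dx, PySem.List.pyGetD bomb 1 0 + dy)
              (cd.getD (PySem.List.pyGetD bomb 0 0 + dx, PySem.List.pyGetD bomb 1 0 + dy) 0 + 1)) cd) cd) d).getD (c, r) 0
    = d.getD (c, r) 0 + near_bombs c r bombs := by
  induction bombs generalizing d with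
  | nil => simp [near_bombs]
  | cons b t ih =>
      simp only [List.foldl_cons]
      rw [ih, pv_scatter_one, pv_near_eq_sum c r (b :: t), List.map_cons, List.sum_cons,
        ← pv_near_eq_sum c r t]
      omega

theorem pv_contains_add (s : PySem.Set (Int × Int)) (x y : Int × Int) :
    (s.add x).contains y = (s.contains y || y == x) := by
  simp only [PySem.Set.contains, PySem.Set.add]
  split_ifs with h
  · by_cases hyx : y = x
    · subst hyx; simp_all
    · simp [hyx]
  · by_cases hyx : y = x <;> simp [hyx]

-- B's set over the whole bomb list computes is_bomb
theorem pv_set_all (bombs : List (List Int)) (s : PySem.Set (Int × Int)) (c r : Int) :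
    (bombs.foldl (fun s bomb =>
        PySem.Set.add s (PySem.List.pyGetD bomb 0 0, PySem.List.pyGetD bomb 1 0)) s).contains (c, r)
    = (s.contains (c, r) || is_bomb c r bombs) := by
  induction bombs generalizing s with
  | nil => simp [is_bomb]
  | cons b t ih =>
      simp only [List.foldl_cons]
      rw [ih, pv_contains_add]
      have hb : is_bomb c r (b :: t)
          = (((c, r) == (PySem.List.pyGetD b 0 0, PySem.List.pyGetD b 1 0)) || is_bomb c r t) := by
        show (if PySem.List.pyGetD b 0 0 = c ∧ PySem.List.pyGetD b 1 0 = r then true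
              else is_bomb c r t) = _
        by_cases h : PySem.List.pyGetD b 0 0 = c ∧ PySem.List.pyGetD b 1 0 = r
        · simp [h]
        · have hne : ¬ ((c, r) = (PySem.List.pyGetD b 0 0, PySem.List.pyGetD b 1 0)) := by
            simp only [Prod.ext_iff]
            tauto
          simp [h, hne]
      rw [hb, Bool.or_assoc]

-- the loop body of either emit loop appends exactly pvEntry
theorem pv_body_eq (bombs : List (List Int)) (acc : List (Int × Int × Int)) (c r : Int) :
    (if is_bomb c r bombs = false then
       if near_bombs c r bombs ≠ 0 then acc ++ [(c, r, near_bombs c r bombs)] else acc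
     else acc) = acc ++ pvEntry bombs c r := by
  unfold pvEntry
  split_ifs <;> simp_all

-- Python's sorted(…, key=itemgetter(0,1)) is a stable sort under the lexicographic pair order
theorem pv_sorted2_eq (xs : List (Int × Int × Int)) :
    PySem.List.sorted2 xs (fun t => t.1) (fun t => t.2.1) = PySem.List.sorted xs pvKey := by
  unfold PySem.List.sorted2 PySem.List.sorted
  show List.foldl (fun acc x => PySem.List.insertBy
      (fun a b => decide (a.1 < b.1) || !decide (b.1 < a.1) && decide (a.2.1 < b.2.1)) x acc) [] xs
    = List.foldl (fun acc x => PySem.List.insertBy (fun a b => decide (pvKey a < pvKey b)) x acc) [] xs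
  have hbf : (fun (a b : Int × Int × Int) =>
        decide (a.1 < b.1) || !decide (b.1 < a.1) && decide (a.2.1 < b.2.1))
      = fun a b => decide (pvKey a < pvKey b) := by
    funext a b
    simp only [pvKey, Prod.Lex.lt_iff, ofLex_toLex]
    rcases lt_trichotomy a.1 b.1 with h | h | h
    · simp [h]
    · simp [h]
    · simp [h, lt_asymm h, ne_of_gt h]
  rw [hbf]

theorem pv_entry_key (bombs : List (List Int)) (c r : Int) :
    ∀ p ∈ pvEntry bombs c r, p.1 = c ∧ p.2.1 = r := by
  unfold pvEntry
  split_ifs <;> simp_all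

theorem pv_col_pairwise (bombs : List (List Int)) (w h : Int) :
    ((PySem.List.pyRange 0 w 1).flatMap fun c =>
      (PySem.List.pyRange 0 h 1).flatMap fun r => pvEntry bombs c r).Pairwise
      (fun p q => pvKey p < pvKey q) := by
  rw [List.pairwise_flatMap]
  constructor
  · intro c _
    rw [List.pairwise_flatMap]
    constructor
    · intro r _
      unfold pvEntry
      split_ifs <;> simp
    · refine (PySem.List.pairwise_lt_pyRange_one 0 h).imp ?_
      intro r1 r2 hlt p hp q hq
      obtain ⟨hp1, hp2⟩ := pv_entry_key bombs c r1 p hp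
      obtain ⟨hq1, hq2⟩ := pv_entry_key bombs c r2 q hq
      simp only [pvKey, Prod.Lex.lt_iff, ofLex_toLex]
      right
      exact ⟨by rw [hp1, hq1], by rw [hp2, hq2]; exact hlt⟩
  · refine (PySem.List.pairwise_lt_pyRange_one 0 w).imp ?_
    intro c1 c2 hlt p hp q hq
    obtain ⟨r1, _, hp'⟩ := List.mem_flatMap.mp hp
    obtain ⟨r2, _, hq'⟩ := List.mem_flatMap.mp hq
    obtain ⟨hp1, _⟩ := pv_entry_key bombs c1 r1 p hp'
    obtain ⟨hq1, _⟩ := pv_entry_key bombs c2 r2 q hq'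
    simp only [pvKey, Prod.Lex.lt_iff, ofLex_toLex]
    left
    rw [hp1, hq1]
    exact hlt

theorem pv_flatMap_swap_perm {α β γ : Type} (l1 : List α) (l2 : List β) (f : α → β → List γ) :
    (l1.flatMap fun a => l2.flatMap (f a)).Perm (l2.flatMap fun b => l1.flatMap (fun a => f a b)) := by
  induction l1 with
  | nil => simp
  | cons a t ih =>
      simp only [List.flatMap_cons]
      calc (l2.flatMap (f a) ++ t.flatMap fun a' => l2.flatMap (f a'))
          |>.Perm (l2.flatMap (f a) ++ l2.flatMap fun b => t.flatMap (fun a' => f a' b)) :=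
            List.Perm.append_left _ ih
        _ |>.Perm (l2.flatMap fun b => f a b ++ t.flatMap (fun a' => f a' b)) :=
            List.flatMap_append_perm l2 (f a) _

theorem pv_main (bombs : List (List Int)) (width height : Int) :
    PySem.List.sorted2
      ((PySem.List.pyRange 0 height 1).foldl (fun acc row =>
        (PySem.List.pyRange 0 width 1).foldl (fun acc cell =>
          if is_bomb cell row bombs = false then
            if near_bombs cell row bombs ≠ 0 then acc ++ [(cell, row, near_bombs cell row bombs)]
            else acc
          else acc) acc) [])
      (fun t => t.1) (fun t => t.2.1)
    = (PySem.List.pyRange 0 width 1).foldl (fun out cell =>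
        (PySem.List.pyRange 0 height 1).foldl (fun out row =>
          if (List.foldl
                (fun (st : PySem.Dict (Int × Int) Int × PySem.Set (Int × Int)) bomb =>
                  (pvOffsets.foldl (fun c dx =>
                      pvOffsets.foldl (fun c dy =>
                        c.insert (PySem.List.pyGetD bomb 0 0 + dx, PySem.List.pyGetD bomb 1 0 + dy)
                          (c.getD (PySem.List.pyGetD bomb 0 0 + dx, PySem.List.pyGetD bomb 1 0 + dy) 0 + 1)) c) st.1,
                   st.2.add (PySem.List.pyGetD bomb 0 0, PySem.List.pyGetD bomb 1 0)))
                (PySem.Dict.empty, PySem.Set.empty) bombs).2.contains (cell, row) = false then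
            if (List.foldl
                (fun (st : PySem.Dict (Int × Int) Int × PySem.Set (Int × Int)) bomb =>
                  (pvOffsets.foldl (fun c dx =>
                      pvOffsets.foldl (fun c dy =>
                        c.insert (PySem.List.pyGetD bomb 0 0 + dx, PySem.List.pyGetD bomb 1 0 + dy)
                          (c.getD (PySem.List.pyGetD bomb 0 0 + dx, PySem.List.pyGetD bomb 1 0 + dy) 0 + 1)) c) st.1,
                   st.2.add (PySem.List.pyGetD bomb 0 0, PySem.List.pyGetD bomb 1 0)))
                (PySem.Dict.empty, PySem.Set.empty) bombs).1.getD (cell, row) 0 ≠ 0 then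
              out ++ [(cell, row, (List.foldl
                (fun (st : PySem.Dict (Int × Int) Int × PySem.Set (Int × Int)) bomb =>
                  (pvOffsets.foldl (fun c dx =>
                      pvOffsets.foldl (fun c dy =>
                        c.insert (PySem.List.pyGetD bomb 0 0 + dx, PySem.List.pyGetD bomb 1 0 + dy)
                          (c.getD (PySem.List.pyGetD bomb 0 0 + dx, PySem.List.pyGetD bomb 1 0 + dy) 0 + 1)) c) st.1,
                   st.2.add (PySem.List.pyGetD bomb 0 0, PySem.List.pyGetD bomb 1 0)))
                (PySem.Dict.empty, PySem.Set.empty) bombs).1.getD (cell, row) 0)]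
            else out
          else out) out) [] := by
  have hst : (List.foldl
        (fun (st : PySem.Dict (Int × Int) Int × PySem.Set (Int × Int)) bomb =>
          (pvOffsets.foldl (fun c dx =>
              pvOffsets.foldl (fun c dy =>
                c.insert (PySem.List.pyGetD bomb 0 0 + dx, PySem.List.pyGetD bomb 1 0 + dy)
                  (c.getD (PySem.List.pyGetD bomb 0 0 + dx, PySem.List.pyGetD bomb 1 0 + dy) 0 + 1)) c) st.1,
           st.2.add (PySem.List.pyGetD bomb 0 0, PySem.List.pyGetD bomb 1 0)))
        (PySem.Dict.empty, PySem.Set.empty) bombs)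
      = (List.foldl (fun cd bomb =>
            pvOffsets.foldl (fun cd dx =>
              pvOffsets.foldl (fun cd dy =>
                cd.insert (PySem.List.pyGetD bomb 0 0 + dx, PySem.List.pyGetD bomb 1 0 + dy)
                  (cd.getD (PySem.List.pyGetD bomb 0 0 + dx, PySem.List.pyGetD bomb 1 0 + dy) 0 + 1)) cd) cd)
            PySem.Dict.empty bombs,
         List.foldl (fun s bomb =>
            PySem.Set.add s (PySem.List.pyGetD bomb 0 0, PySem.List.pyGetD bomb 1 0))
            PySem.Set.empty bombs) :=
    PySem.List.foldl_prod_mk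
      (fun (cd : PySem.Dict (Int × Int) Int) bomb =>
        pvOffsets.foldl (fun cd dx =>
          pvOffsets.foldl (fun cd dy =>
            cd.insert (PySem.List.pyGetD bomb 0 0 + dx, PySem.List.pyGetD bomb 1 0 + dy)
              (cd.getD (PySem.List.pyGetD bomb 0 0 + dx, PySem.List.pyGetD bomb 1 0 + dy) 0 + 1)) cd) cd)
      (fun (s : PySem.Set (Int × Int)) bomb => PySem.Set.add s (PySem.List.pyGetD bomb 0 0, PySem.List.pyGetD bomb 1 0))
      bombs PySem.Dict.empty PySem.Set.empty
  rw [hst]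
  have hce : ∀ p : Int × Int, (PySem.Set.empty : PySem.Set (Int × Int)).contains p = false :=
    fun _ => rfl
  simp only [pv_set_all, pv_scatter_all, PySem.Dict.getD_empty, hce, Bool.false_or, zero_add]
  simp only [pv_body_eq, PySem.List.foldl_append_eq_flatMap, List.nil_append]
  rw [pv_sorted2_eq]
  exact PySem.List.sorted_eq_of_perm_of_pairwise_lt _ _ pvKey
    ((pv_flatMap_swap_perm (PySem.List.pyRange 0 height 1) (PySem.List.pyRange 0 width 1)
      (fun row cell => pvEntry bombs cell row)).symm)
    (pv_col_pairwise bombs width height)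

theorem find_state_2_cells_spec : Claim_equal_find_state_2_cells := by
  intro gl _ _
  exact pv_main (PySem.List.slice gl (some 1) none)
    (PySem.List.pyGetD (PySem.List.pyGetD gl 0 []) 0 0)
    (PySem.List.pyGetD (PySem.List.pyGetD gl 0 []) 1 0)
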